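-- pv_equiv track=rewrite | github.com/ANU-HPC/dagster | Benchmarks/bmc/cmbc_joiner.py | contract_sequence
-- ===== SOURCE A (Python) =====
-- def contract_sequence(seq):
-- 	seq = sorted(seq)
-- 	s = []
-- 	for ss in seq:
-- 		if len(s)==0 or s[-1][0]+s[-1][1]!=ss-1:
-- 			s.append([ss,0])
-- 		else:
-- 			s[-1][1] += 1
-- 	st = []
-- 	for ss in s:
-- 		if ss[1]==0:
-- 			st.append("{}".format(ss[0]))
-- 		else:
-- 			st.append("{}-{}".format(ss[0],ss[0]+ss[1]))
-- 	return ",".join(st)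
-- ===== SOURCE B (Python) =====
-- def contract_sequence(seq):
-- 	keyed = [(v - i, v) for i, v in enumerate(sorted(seq))]
-- 	keyed.reverse()  # a stack: pop() from the end is O(1)
-- 	parts = []
-- 	while keyed:
-- 		k, lo = keyed.pop()
-- 		group = [lo]
-- 		while keyed and keyed[-1][0] == k:
-- 			group.append(keyed.pop()[1])
-- 		hi = group[-1]
-- 		parts.append("{}".format(lo) if lo == hi else "{}-{}".format(lo, hi))
-- 	return ",".join(parts)
-- ===== Notes on version B (the rewrite author's own statement) =====
-- stated objective: alternative
-- what changed: Replaces A's flat fold that builds [start,count] pairs by mutating the last pair plus a second formatting pass with the classic enumerate-key grouping: tag each sorted value v at position i with key v-i, then peel maximal spans of equal adjacent key off a stack (a manual itertools.groupby) and format each group from its first and last value.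
import Mathlib
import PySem

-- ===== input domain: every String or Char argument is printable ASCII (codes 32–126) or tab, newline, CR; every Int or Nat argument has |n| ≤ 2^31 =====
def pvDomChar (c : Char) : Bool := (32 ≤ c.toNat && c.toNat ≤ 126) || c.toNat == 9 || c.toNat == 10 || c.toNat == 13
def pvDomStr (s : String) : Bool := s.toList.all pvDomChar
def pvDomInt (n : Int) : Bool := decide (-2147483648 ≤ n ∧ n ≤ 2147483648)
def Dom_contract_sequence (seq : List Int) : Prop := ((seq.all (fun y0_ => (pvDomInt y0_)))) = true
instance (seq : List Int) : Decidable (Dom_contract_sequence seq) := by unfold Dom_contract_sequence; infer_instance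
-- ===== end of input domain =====

-- B replaces A's [start,count] fold + second formatting pass with enumerate-key (v-i) grouping à la itertools.groupby; objective: alternative.

-- ===== PORT A =====
-- step of A's first loop: s is the list of [start, count] pairs, mutated at its last element
def csStepA (s : List (Int × Int)) (ss : Int) : List (Int × Int) :=
  match s.getLast? with
  | none => s ++ [(ss, 0)]
  | some (a, b) => if a + b ≠ ss - 1 then s ++ [(ss, 0)] else s.dropLast ++ [(a, b + 1)]

-- A's second loop: format one [start, count] pair
def csFmtA (p : Int × Int) : String :=
  if p.2 = 0 then PySem.Int.toStr p.1
  else PySem.Int.toStr p.1 ++ "-" ++ PySem.Int.toStr (p.1 + p.2)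

def contract_sequence (seq : List Int) : String :=
  let seq := PySem.List.sorted seq (fun x => x) false
  let s := seq.foldl csStepA []
  let st := s.map csFmtA
  PySem.Str.join "," st

-- ===== PORT B =====
-- Source B reverses keyed and pops from the END of that stack; popping the last element of the
-- reversed list is exactly taking the head of the unreversed list, so the port consumes the
-- keyed list from the front (an exact modeling of the reverse + pop() pair).
-- inner while loop of B: pop leading (key, value) pairs with key k; returns (their values, remainder)
def csTakeGroup (k : Int) : List (Int × Int) → (List Int × List (Int × Int))
  | [] => ([], [])
  | (k', v) :: rest =>
      if k' = k then
        let gr := csTakeGroup k rest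
        (v :: gr.1, gr.2)
      else ([], (k', v) :: rest)

theorem csTakeGroup_len (k : Int) (l : List (Int × Int)) :
    (csTakeGroup k l).2.length ≤ l.length := by
  induction l with
  | nil => simp [csTakeGroup]
  | cons p rest ih =>
    rcases p with ⟨k', v⟩
    simp only [csTakeGroup]
    split
    · exact Nat.le_succ_of_le ih
    · simp

-- outer while loop of B: peel one group per step, formatting it from its first and last value
def csPartsB : List (Int × Int) → List String
  | [] => []
  | (k, lo) :: rest =>
      let gr := csTakeGroup k rest
      (if lo = gr.1.getLastD lo then PySem.Int.toStr lo
       else PySem.Int.toStr lo ++ "-" ++ PySem.Int.toStr (gr.1.getLastD lo)) :: csPartsB gr.2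
termination_by l => l.length
decreasing_by exact Nat.lt_succ_of_le (csTakeGroup_len _ _)

def contract_sequence_alt (seq : List Int) : String :=
  let keyed := (PySem.List.enumerate (PySem.List.sorted seq (fun x => x) false)).map
    (fun p => (p.2 - p.1, p.2))
  PySem.Str.join "," (csPartsB keyed)

-- ===== PRECONDITION & SPEC =====
def Spec_contract_sequence (seq : List Int) (out : String) : Prop := out = contract_sequence_alt seq
instance (seq : List Int) (out : String) : Decidable (Spec_contract_sequence seq out) := by unfold Spec_contract_sequence; infer_instance

-- ===== CLAIM (what is proved, stated in full; the proofs are below) =====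
def Claim_equal_contract_sequence : Prop := ∀ (seq : List Int), Dom_contract_sequence seq → Spec_contract_sequence seq (contract_sequence seq)

-- ===== LEMMAS AND PROOFS =====

-- common spec: emit one range string
def csEmitB (lo hi : Int) : String :=
  if lo = hi then PySem.Int.toStr lo
  else PySem.Int.toStr lo ++ "-" ++ PySem.Int.toStr hi

-- common spec: the range strings for the run state (lo, hi) followed by the rest of the list
def csGoB (lo hi : Int) : List Int → List String
  | [] => [csEmitB lo hi]
  | x :: rest => if x = hi + 1 then csGoB lo x rest
                 else csEmitB lo hi :: csGoB x x rest

-- proof-side view of B's keyed list built from offset j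
def csKeyed (j : Int) : List Int → List (Int × Int)
  | [] => []
  | x :: xs => (x - j, x) :: csKeyed (j + 1) xs

theorem csKeyed_eq (l : List Int) (j : Int) :
    (PySem.List.enumerate l j).map (fun p => (p.2 - p.1, p.2)) = csKeyed j l := by
  induction l generalizing j with
  | nil => simp [csKeyed, PySem.List.enumerate_nil]
  | cons x xs ih => simp [csKeyed, PySem.List.enumerate_cons, ih]

-- A's fold only touches the last pair: a nonempty prefix is carried through unchanged
theorem csFold_prefix (l : List Int) (acc : List (Int × Int)) (g : Int × Int) :
    l.foldl csStepA (acc ++ [g]) = acc ++ l.foldl csStepA [g] := by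
  induction l generalizing acc g with
  | nil => simp
  | cons x l ih =>
    rcases g with ⟨a, b⟩
    have hstep : csStepA (acc ++ [(a, b)]) x = acc ++ csStepA [(a, b)] x := by
      simp only [csStepA, List.getLast?_concat, List.getLast?_singleton,
        List.dropLast_concat, List.dropLast_singleton]
      split <;> simp
    rw [List.foldl_cons, List.foldl_cons, hstep]
    by_cases h : a + b = x - 1
    · rw [show csStepA [(a, b)] x = [(a, b + 1)] from by simp [csStepA, h]]
      exact ih acc (a, b + 1)
    · rw [show csStepA [(a, b)] x = [(a, b)] ++ [(x, 0)] from by simp [csStepA, h]]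
      rw [← List.append_assoc, ih (acc ++ [(a, b)]) (x, 0), ih [(a, b)] (x, 0)]
      simp

theorem csFmtA_eq (a b : Int) : csFmtA (a, b) = csEmitB a (a + b) := by
  simp only [csFmtA, csEmitB]
  by_cases hb : b = 0
  · simp [hb]
  · rw [if_neg hb, if_neg (by omega)]

-- A's fold-then-format on a single open group (a, b) is the common spec with lo = a, hi = a + b
theorem csFold_eq_goB (l : List Int) (a b : Int) :
    (l.foldl csStepA [(a, b)]).map csFmtA = csGoB a (a + b) l := by
  induction l generalizing a b with
  | nil =>
    simp only [List.foldl_nil, List.map_cons, List.map_nil, csGoB, csFmtA_eq]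
  | cons x l ih =>
    simp only [List.foldl_cons, csStepA, List.getLast?_singleton]
    by_cases h : a + b ≠ x - 1
    · rw [if_pos h]
      rw [csFold_prefix l [(a, b)] (x, 0)]
      simp only [List.map_append, List.map_cons, List.map_nil]
      rw [ih x 0]
      simp only [csGoB, add_zero]
      rw [if_neg (by omega)]
      simp [csFmtA_eq]
    · rw [if_neg h]
      simp only [List.dropLast_singleton, List.nil_append]
      rw [ih a (b + 1)]
      simp only [csGoB]
      rw [if_pos (by omega)]
      congr 1
      omega

-- B's group-peeling on the keyed tail of a run computes the common spec
theorem csPartsB_eq_goB (xs : List Int) (j lo hi : Int) :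
    csEmitB lo (((csTakeGroup (hi - j) (csKeyed (j + 1) xs)).1).getLastD hi) ::
      csPartsB ((csTakeGroup (hi - j) (csKeyed (j + 1) xs)).2) = csGoB lo hi xs := by
  induction xs generalizing j lo hi with
  | nil => simp [csKeyed, csTakeGroup, csPartsB, csGoB]
  | cons y ys ih =>
    simp only [csKeyed, csTakeGroup, csGoB]
    by_cases h : y = hi + 1
    · have hk : y - (j + 1) = hi - j := by omega
      rw [if_pos hk, if_pos h]
      have hIH := ih (j + 1) lo y
      rw [hk] at hIH
      simpa only [List.getLastD_cons] using hIH
    · have hk : y - (j + 1) ≠ hi - j := by omega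
      rw [if_neg hk, if_neg h]
      have hIH := ih (j + 1) y y
      simp only [csPartsB, csEmitB] at hIH ⊢
      rw [hIH]
      simp

-- ===== VERDICT (by name: the statement is the Claim_ definition above) =====
theorem contract_sequence_spec : Claim_equal_contract_sequence := by
  intro seq _
  unfold Spec_contract_sequence contract_sequence contract_sequence_alt
  rw [csKeyed_eq]
  rcases h : PySem.List.sorted seq (fun x => x) false with _ | ⟨x, rest⟩
  · simp [csKeyed, csPartsB, PySem.Str.join]
  · simp only [List.foldl_cons, csStepA, List.getLast?_nil, List.nil_append]
    rw [csFold_eq_goB rest x 0, add_zero]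
    have hIH := csPartsB_eq_goB rest 0 x x
    simp only [zero_add, sub_zero, csEmitB] at hIH
    simp only [csKeyed, csPartsB, sub_zero, zero_add]
    rw [hIH]
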